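-- pv_equiv track=rewrite | github.com/syntacticio-art/Leetcode | Daily ques/1611. Minimum One Bit Operations to Make Integers Zero/solution.py | minimumOneBitOperations
-- ===== SOURCE A (Python) =====
-- def minimumOneBitOperations(n: int) -> int:
--     res = 0
--     toggle = 0
--     while n:
--         toggle ^= n
--         res = toggle
--         n >>= 1
--     return res
-- ===== SOURCE B (Python) =====
-- def minimumOneBitOperations(n: int) -> int:
--     if n == 0:
--         return 0
--     k = n.bit_length() - 1
--     return (1 << (k + 1)) - 1 - minimumOneBitOperations(n ^ (1 << k))
-- ===== Notes on version B (the rewrite author's own statement) =====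
-- stated objective: alternative
-- what changed: Replaces the XOR-accumulating right-shift loop with a recursion on the most-significant set bit using the closed-form contribution 2^(k+1)-1 per level (inverse Gray code identity).
import Mathlib
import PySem

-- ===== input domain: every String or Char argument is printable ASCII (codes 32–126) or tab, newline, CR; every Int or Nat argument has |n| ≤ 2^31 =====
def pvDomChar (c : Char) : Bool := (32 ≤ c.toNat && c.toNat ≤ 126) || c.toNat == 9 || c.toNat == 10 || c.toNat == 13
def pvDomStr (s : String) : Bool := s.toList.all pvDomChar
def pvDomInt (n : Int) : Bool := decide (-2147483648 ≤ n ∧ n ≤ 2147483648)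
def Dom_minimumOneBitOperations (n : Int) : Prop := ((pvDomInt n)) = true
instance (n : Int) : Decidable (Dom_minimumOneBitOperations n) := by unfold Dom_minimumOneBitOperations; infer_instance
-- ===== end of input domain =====

-- ===== PORT A =====
-- B recurses on the top set bit with a closed-form per-level term instead of A's
-- XOR-accumulating right-shift loop.  Both Pythons loop forever on n < 0, which
-- Pre_ excludes; the fuel arguments below only make the recursions total
-- (n.toNat + 1 resp. n.toNat steps always suffice, proved in the lemmas).
-- while n: toggle ^= n; res = toggle; n >>= 1   (transliterated)
def pvLoopA : Nat → Int → Int → Int → Int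
  | 0, _, _, r => r
  | fuel + 1, n, toggle, r =>
    if 0 < n then
      pvLoopA fuel (n >>> (1 : Nat)) (PySem.Int.bxor toggle n) (PySem.Int.bxor toggle n)
    else r

def minimumOneBitOperations (n : Int) : Int := pvLoopA (n.toNat + 1) n 0 0

-- ===== PORT B =====
-- recursion of Source B on Nat (inputs admitted by Pre_ are nonnegative): Nat.size = bit_length
def pvAltN : Nat → Nat → Nat
  | 0, _ => 0
  | fuel + 1, m =>
    if m = 0 then 0
    else (1 <<< (m.size - 1 + 1)) - 1 - pvAltN fuel (m ^^^ 1 <<< (m.size - 1))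

def minimumOneBitOperations_alt (n : Int) : Int :=
  if n ≤ 0 then 0 else (pvAltN n.toNat n.toNat : Nat)

-- ===== PRECONDITION & SPEC =====
-- Pre_ excludes n < 0, on which Python A's 'n >>= 1' loop never terminates (and B diverges too).
def Pre_minimumOneBitOperations (n : Int) : Prop := 0 ≤ n
instance (n : Int) : Decidable (Pre_minimumOneBitOperations n) := by
  unfold Pre_minimumOneBitOperations; infer_instance
def pvWitness_minimumOneBitOperations : Int := 6
def Spec_minimumOneBitOperations (n : Int) (out : Int) : Prop := out = minimumOneBitOperations_alt n
instance (n : Int) (out : Int) : Decidable (Spec_minimumOneBitOperations n out) := by unfold Spec_minimumOneBitOperations; infer_instance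

-- ===== CLAIM (what is proved, stated in full; the proofs are below) =====
def Claim_equal_minimumOneBitOperations : Prop := ∀ (n : Int), Dom_minimumOneBitOperations n → Pre_minimumOneBitOperations n → Spec_minimumOneBitOperations n (minimumOneBitOperations n)

-- ===== LEMMAS AND PROOFS =====
theorem pv_two_pow_add_eq_xor (k r : Nat) (h : r < 2 ^ k) : 2 ^ k + r = 2 ^ k ^^^ r := by
  apply Nat.eq_of_testBit_eq; intro i
  rcases lt_trichotomy i k with hi | hi | hi
  · rw [Nat.testBit_two_pow_add_gt hi, Nat.testBit_xor,
      Nat.testBit_two_pow_of_ne (by omega)]; simp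
  · subst hi
    rw [Nat.testBit_two_pow_add_eq, Nat.testBit_xor, Nat.testBit_two_pow_self,
      Nat.testBit_lt_two_pow h]; simp
  · have hpow : 2 ^ (k + 1) ≤ 2 ^ i := Nat.pow_le_pow_right (by norm_num) (by omega)
    have h1 : 2 ^ k + r < 2 ^ i := by
      have : 2 ^ k + r < 2 ^ (k + 1) := by
        have := Nat.pow_succ 2 k; omega
      omega
    have h2 : r < 2 ^ i := by omega
    rw [Nat.testBit_lt_two_pow h1, Nat.testBit_xor,
      Nat.testBit_two_pow_of_ne (by omega), Nat.testBit_lt_two_pow h2]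
    simp

-- abstract value of A's loop: T 0 = 0, T m = m ^^^ T (m / 2)
def pvT (m : Nat) : Nat :=
  if m = 0 then 0 else m ^^^ pvT (m / 2)
termination_by m
decreasing_by omega

theorem pvT_zero : pvT 0 = 0 := by simp [pvT]

theorem pvT_succ (m : Nat) : pvT m = m ^^^ pvT (m / 2) := by
  by_cases h : m = 0
  · subst h; simp [pvT]
  · rw [pvT]; simp [h]

theorem pvT_lt (j : Nat) : ∀ m, m < 2 ^ j → pvT m < 2 ^ j := by
  intro m
  induction m using Nat.strong_induction_on with
  | _ m ih =>
    intro hm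
    by_cases h : m = 0
    · subst h; rw [pvT_zero]; exact Nat.two_pow_pos j
    · rw [pvT_succ]
      exact Nat.xor_lt_two_pow hm (ih (m / 2) (by omega) (by omega))

-- A's loop in terms of pvT (any sufficient fuel)
theorem pvLoopA_eq : ∀ (m : Nat), ∀ (fuel : Nat), m < fuel → ∀ (t : Nat) (r : Int),
    pvLoopA fuel (m : Int) (t : Int) r = if m = 0 then r else ((t ^^^ pvT m : Nat) : Int) := by
  intro m
  induction m using Nat.strong_induction_on with
  | _ m ih =>
    intro fuel hfuel t r
    obtain ⟨f, rfl⟩ : ∃ f, fuel = f + 1 := ⟨fuel - 1, by omega⟩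
    by_cases h : m = 0
    · subst h; simp [pvLoopA]
    · have hpos : (0 : Int) < (m : Int) := by exact_mod_cast Nat.pos_of_ne_zero h
      have hshift : ((m : Int) >>> (1 : Nat)) = ((m / 2 : Nat) : Int) := by
        rw [Int.shiftRight_eq_div_pow]; push_cast; norm_num [Int.ediv_emod_unique]
      rw [pvLoopA, if_pos hpos, PySem.Int.bxor_natCast, hshift,
        ih (m / 2) (by omega) f (by omega)]
      by_cases h2 : m / 2 = 0
      · have hTm : pvT m = m := by rw [pvT_succ, h2, pvT_zero, Nat.xor_zero]
        simp [h2, hTm, h]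
      · rw [if_neg h2, if_neg h, pvT_succ m, ← Nat.xor_assoc]

-- the inverse-Gray identity: pvT (2^k + r) = (2^(k+1) - 1) ^^^ pvT r for r < 2^k
theorem pvT_top (k : Nat) : ∀ r, r < 2 ^ k → pvT (2 ^ k + r) = (2 ^ (k + 1) - 1) ^^^ pvT r := by
  induction k with
  | zero =>
    intro r hr
    have : r = 0 := by omega
    subst this
    simp [pvT_succ 1, pvT_zero]
  | succ k ih =>
    intro r hr
    have hr2 : r / 2 < 2 ^ k := by
      have := Nat.pow_succ 2 k; omega
    have hdiv : (2 ^ (k + 1) + r) / 2 = 2 ^ k + r / 2 := by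
      have : 2 ^ (k + 1) = 2 * 2 ^ k := by ring
      omega
    have hxr : 2 ^ (k + 1) + r = 2 ^ (k + 1) ^^^ r := pv_two_pow_add_eq_xor _ _ hr
    have hones : 2 ^ (k + 1) ^^^ (2 ^ (k + 1) - 1) = 2 ^ (k + 2) - 1 := by
      have h1 : 2 ^ (k + 1) - 1 < 2 ^ (k + 1) := by
        have := Nat.two_pow_pos (k + 1); omega
      have h3 := pv_two_pow_add_eq_xor (k + 1) (2 ^ (k + 1) - 1) h1
      have h2 : 2 ^ (k + 1) + (2 ^ (k + 1) - 1) = 2 ^ (k + 2) - 1 := by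
        have : 2 ^ (k + 2) = 2 * 2 ^ (k + 1) := by ring
        have hp := Nat.two_pow_pos (k + 1)
        omega
      omega
    calc pvT (2 ^ (k + 1) + r)
        = (2 ^ (k + 1) + r) ^^^ pvT ((2 ^ (k + 1) + r) / 2) := pvT_succ _
      _ = (2 ^ (k + 1) ^^^ r) ^^^ pvT (2 ^ k + r / 2) := by rw [← hxr, hdiv]
      _ = (2 ^ (k + 1) ^^^ r) ^^^ ((2 ^ (k + 1) - 1) ^^^ pvT (r / 2)) := by rw [ih _ hr2]
      _ = (2 ^ (k + 1) ^^^ (2 ^ (k + 1) - 1)) ^^^ (r ^^^ pvT (r / 2)) := by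
          rw [Nat.xor_assoc, Nat.xor_assoc]
          congr 1
          rw [← Nat.xor_assoc, ← Nat.xor_assoc, Nat.xor_comm r _]
      _ = (2 ^ (k + 2) - 1) ^^^ pvT r := by rw [hones, ← pvT_succ]

-- complement within j bits: x ^^^ (2^j - 1) = 2^j - 1 - x
theorem pv_xor_ones (j : Nat) : ∀ x, x < 2 ^ j → x ^^^ (2 ^ j - 1) = 2 ^ j - 1 - x := by
  induction j with
  | zero => intro x hx; interval_cases x; rfl
  | succ j ih =>
    intro x hx
    have hsplit : 2 ^ (j + 1) - 1 = 2 ^ j + (2 ^ j - 1) := by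
      have : 2 ^ (j + 1) = 2 * 2 ^ j := by ring
      have hp := Nat.two_pow_pos j
      omega
    have hp := Nat.two_pow_pos j
    have hones : 2 ^ (j + 1) - 1 = 2 ^ j ^^^ (2 ^ j - 1) := by
      rw [hsplit]; exact pv_two_pow_add_eq_xor j _ (by omega)
    by_cases hlow : x < 2 ^ j
    · have ihx := ih x hlow
      have hlt : 2 ^ j - 1 - x < 2 ^ j := by omega
      calc x ^^^ (2 ^ (j + 1) - 1)
          = x ^^^ (2 ^ j ^^^ (2 ^ j - 1)) := by rw [hones]
        _ = 2 ^ j ^^^ (x ^^^ (2 ^ j - 1)) := by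
            rw [← Nat.xor_assoc, Nat.xor_comm x (2 ^ j), Nat.xor_assoc]
        _ = 2 ^ j ^^^ (2 ^ j - 1 - x) := by rw [ihx]
        _ = 2 ^ j + (2 ^ j - 1 - x) := (pv_two_pow_add_eq_xor j _ hlt).symm
        _ = 2 ^ (j + 1) - 1 - x := by omega
    · have hr : x - 2 ^ j < 2 ^ j := by
        have : 2 ^ (j + 1) = 2 * 2 ^ j := by ring
        omega
      have hxr : x = 2 ^ j ^^^ (x - 2 ^ j) := by
        have := pv_two_pow_add_eq_xor j (x - 2 ^ j) hr
        omega
      have hcancel : ∀ a b c : Nat, (a ^^^ b) ^^^ (a ^^^ c) = b ^^^ c := by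
        intro a b c
        rw [Nat.xor_assoc, ← Nat.xor_assoc b a c, Nat.xor_comm b a,
          Nat.xor_assoc a b c, ← Nat.xor_assoc, Nat.xor_self, Nat.zero_xor]
      calc x ^^^ (2 ^ (j + 1) - 1)
          = (2 ^ j ^^^ (x - 2 ^ j)) ^^^ (2 ^ j ^^^ (2 ^ j - 1)) := by rw [← hxr, ← hones]
        _ = (x - 2 ^ j) ^^^ (2 ^ j - 1) := hcancel _ _ _
        _ = 2 ^ j - 1 - (x - 2 ^ j) := ih _ hr
        _ = 2 ^ (j + 1) - 1 - x := by
            have : 2 ^ (j + 1) = 2 * 2 ^ j := by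
              omega
            omega

-- B's recursion computes pvT (any sufficient fuel)
theorem pvAltN_eq_pvT : ∀ (m : Nat), ∀ (fuel : Nat), m ≤ fuel → pvAltN fuel m = pvT m := by
  intro m
  induction m using Nat.strong_induction_on with
  | _ m ih =>
    intro fuel hfuel
    by_cases h : m = 0
    · subst h
      cases fuel with
      | zero => simp [pvAltN, pvT_zero]
      | succ f => simp [pvAltN, pvT_zero]
    · obtain ⟨f, rfl⟩ : ∃ f, fuel = f + 1 := ⟨fuel - 1, by omega⟩
      have hp : 0 < m.size := Nat.size_pos.mpr (Nat.pos_of_ne_zero h)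
      set k := m.size - 1 with hk
      have hk1 : 2 ^ k ≤ m := (Nat.lt_size).mp (by omega)
      have hk2 : m < 2 ^ (k + 1) := by
        have h1 := Nat.lt_size_self m
        have h2 : 2 ^ m.size ≤ 2 ^ (k + 1) := Nat.pow_le_pow_right (by norm_num) (by omega)
        omega
      have hm : m = 2 ^ k + (m - 2 ^ k) := by omega
      have hrr : m - 2 ^ k < 2 ^ k := by
        have : 2 ^ (k + 1) = 2 * 2 ^ k := by ring
        omega
      have hxr : m ^^^ 1 <<< k = m - 2 ^ k := by
        have hx : m = 2 ^ k ^^^ (m - 2 ^ k) :=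
          hm.trans (pv_two_pow_add_eq_xor k _ hrr)
        rw [Nat.shiftLeft_eq, one_mul]
        conv_lhs => rw [hx]
        rw [Nat.xor_comm (2 ^ k) _, Nat.xor_assoc, Nat.xor_self, Nat.xor_zero]
      have hTlt : pvT (m - 2 ^ k) < 2 ^ (k + 1) :=
        pvT_lt (k + 1) _ (by omega)
      have htop : pvT m = (2 ^ (k + 1) - 1) ^^^ pvT (m - 2 ^ k) := by
        conv_lhs => rw [hm]
        exact pvT_top k _ hrr
      have hones : pvT m = 2 ^ (k + 1) - 1 - pvT (m - 2 ^ k) := by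
        rw [htop, Nat.xor_comm]
        exact pv_xor_ones (k + 1) _ hTlt
      have hlt : m - 2 ^ k < m := by
        have := Nat.two_pow_pos k; omega
      rw [pvAltN]
      simp only [h, if_false]
      rw [hxr, ih _ hlt f (by omega)]
      rw [Nat.shiftLeft_eq, one_mul, hones]

-- ===== VERDICT (by name: the statement is the Claim_ definition above) =====
theorem minimumOneBitOperations_spec : Claim_equal_minimumOneBitOperations := by
  intro n _ hpre
  have h0 : 0 ≤ n := hpre
  unfold Spec_minimumOneBitOperations minimumOneBitOperations minimumOneBitOperations_alt
  obtain ⟨m, rfl⟩ : ∃ m : Nat, n = (m : Int) := ⟨n.toNat, by omega⟩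
  rw [Int.toNat_natCast]
  have hL := pvLoopA_eq m (m + 1) (by omega) 0 0
  simp only [Nat.cast_zero] at hL
  rw [hL]
  by_cases h : m = 0
  · subst h; simp
  · have h1 : ¬ ((m : Int) ≤ 0) := by
      have : 0 < m := Nat.pos_of_ne_zero h
      omega
    rw [if_neg h, if_neg h1, pvAltN_eq_pvT m m le_rfl, Nat.zero_xor]
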